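-- pv_equiv track=rewrite | github.com/slaclab/surf | ethernet/EthMacCore/rtl/EthDspCrc32Pkg.py | GetXorTaps
-- ===== SOURCE A (Python) =====
-- def GetXorTaps (
--     lfsrPolySize,
--     numDataBits,
--     LfsrMatrix,
--     ):
--
--     dXorTaps = [([0] * numDataBits) for i in range(lfsrPolySize)]
--     cXorTaps = [([0] * lfsrPolySize) for i in range(lfsrPolySize)]
--
--     for i in range(lfsrPolySize):
--
--         for j in range(numDataBits):
--             if(LfsrMatrix[(lfsrPolySize*lfsrPolySize)+(j*lfsrPolySize)+i]):
--                 dXorTaps[i][j] = 1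
--
--         for j in range(lfsrPolySize):
--             if(LfsrMatrix[j*lfsrPolySize+i]):
--                 cXorTaps[i][j] = 1
--
--     return dXorTaps, cXorTaps
-- ===== SOURCE B (Python) =====
-- def GetXorTaps(
--     lfsrPolySize,
--     numDataBits,
--     LfsrMatrix,
--     ):
--
--     sq = lfsrPolySize * lfsrPolySize
--     width = max(numDataBits, 0) * lfsrPolySize
--
--     # each output row is a stride-lfsrPolySize column slice of the flat
--     # matrix, mapped to 0/1 — no preallocation, no in-place writes
--     dXorTaps = [[1 if v else 0 for v in LfsrMatrix[sq + i : sq + width : lfsrPolySize]]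
--                 for i in range(lfsrPolySize)]
--     cXorTaps = [[1 if v else 0 for v in LfsrMatrix[i : sq : lfsrPolySize]]
--                 for i in range(lfsrPolySize)]
--     return dXorTaps, cXorTaps
-- ===== Notes on version B (the rewrite author's own statement) =====
-- stated objective: alternative
-- what changed: A preallocates zero matrices and scatters 1s via nested conditional index writes; B builds each output row directly as a 0/1 map over a stride-lfsrPolySize slice of the flat matrix, with no preallocation or mutation.
import Mathlib
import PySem

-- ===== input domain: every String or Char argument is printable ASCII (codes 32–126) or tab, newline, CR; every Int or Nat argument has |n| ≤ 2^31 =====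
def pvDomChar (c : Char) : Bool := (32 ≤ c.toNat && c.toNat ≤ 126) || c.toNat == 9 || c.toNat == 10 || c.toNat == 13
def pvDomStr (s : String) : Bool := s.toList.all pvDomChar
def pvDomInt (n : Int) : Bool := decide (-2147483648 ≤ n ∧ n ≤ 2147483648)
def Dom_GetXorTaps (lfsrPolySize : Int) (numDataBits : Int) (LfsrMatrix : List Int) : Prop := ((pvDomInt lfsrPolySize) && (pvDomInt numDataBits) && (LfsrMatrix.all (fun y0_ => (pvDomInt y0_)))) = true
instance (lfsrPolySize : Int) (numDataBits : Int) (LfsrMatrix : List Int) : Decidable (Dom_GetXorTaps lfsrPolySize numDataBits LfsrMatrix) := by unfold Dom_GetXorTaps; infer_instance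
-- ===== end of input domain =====

-- B replaces A's allocate-zeros-then-scatter nested loops by a pure gather: each output row is a
-- stride slice of the flat matrix mapped to 0/1 — alternative decomposition, same cost.


-- ===== PORT A =====
-- helper for the Python statement 'x[i][j] = 1' (under Pre_ the indices are always in range,
-- where List.modify/set are exact)
def pvSet2 (m : List (List Int)) (i j : Nat) : List (List Int) :=
  m.modify i (fun r => r.set j 1)

def GetXorTaps (lfsrPolySize : Int) (numDataBits : Int) (LfsrMatrix : List Int) :
    List (List Int) × List (List Int) :=
  -- [([0] * numDataBits) for i in range(lfsrPolySize)] ([0]*n is replicate n.toNat: empty for n ≤ 0)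
  let dXorTaps := (PySem.List.pyRange 0 lfsrPolySize 1).map
    (fun _ => List.replicate numDataBits.toNat (0 : Int))
  let cXorTaps := (PySem.List.pyRange 0 lfsrPolySize 1).map
    (fun _ => List.replicate lfsrPolySize.toNat (0 : Int))
  -- LfsrMatrix[idx] is pyGetD (in range under Pre_); Python truthiness of an int is ≠ 0
  (PySem.List.pyRange 0 lfsrPolySize 1).foldl
    (fun st i =>
      ((PySem.List.pyRange 0 numDataBits 1).foldl
        (fun d j =>
          if PySem.List.pyGetD LfsrMatrix (lfsrPolySize * lfsrPolySize + j * lfsrPolySize + i) 0 ≠ 0 then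
            pvSet2 d i.toNat j.toNat
          else d) st.1,
       (PySem.List.pyRange 0 lfsrPolySize 1).foldl
        (fun c j =>
          if PySem.List.pyGetD LfsrMatrix (j * lfsrPolySize + i) 0 ≠ 0 then
            pvSet2 c i.toNat j.toNat
          else c) st.2))
    (dXorTaps, cXorTaps)

-- ===== PORT B =====
def GetXorTaps_alt (lfsrPolySize : Int) (numDataBits : Int) (LfsrMatrix : List Int) :
    List (List Int) × List (List Int) :=
  let sq := lfsrPolySize * lfsrPolySize
  let width := max numDataBits 0 * lfsrPolySize
  -- '1 if v else 0' on an int is v ≠ 0; LfsrMatrix[a:b:step] is slice? (none only for step 0,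
  -- and step = lfsrPolySize > 0 whenever a row is built, so getD [] is exact)
  ((PySem.List.pyRange 0 lfsrPolySize 1).map (fun i =>
      ((PySem.List.slice? LfsrMatrix (some (sq + i)) (some (sq + width)) lfsrPolySize).getD []).map
        (fun v => if v ≠ 0 then (1 : Int) else 0)),
   (PySem.List.pyRange 0 lfsrPolySize 1).map (fun i =>
      ((PySem.List.slice? LfsrMatrix (some i) (some sq) lfsrPolySize).getD []).map
        (fun v => if v ≠ 0 then (1 : Int) else 0)))

-- ===== PRECONDITION & SPEC =====
-- Pre_ excludes exactly the inputs on which Python A raises IndexError: a positive lfsrPolySize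
-- with LfsrMatrix shorter than the largest flat index A reads.
def Pre_GetXorTaps (lfsrPolySize : Int) (numDataBits : Int) (LfsrMatrix : List Int) : Prop :=
  lfsrPolySize ≤ 0 ∨
    lfsrPolySize * lfsrPolySize + (max numDataBits 0) * lfsrPolySize ≤ (LfsrMatrix.length : Int)
instance (lfsrPolySize : Int) (numDataBits : Int) (LfsrMatrix : List Int) : Decidable (Pre_GetXorTaps lfsrPolySize numDataBits LfsrMatrix) := by unfold Pre_GetXorTaps; infer_instance

def pvWitness_GetXorTaps : Int × Int × List Int := (2, 1, [1, 0, 0, 1, 0, 1])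

def Spec_GetXorTaps (lfsrPolySize : Int) (numDataBits : Int) (LfsrMatrix : List Int) (out : List (List Int) × List (List Int)) : Prop := out = GetXorTaps_alt lfsrPolySize numDataBits LfsrMatrix
instance (lfsrPolySize : Int) (numDataBits : Int) (LfsrMatrix : List Int) (out : List (List Int) × List (List Int)) : Decidable (Spec_GetXorTaps lfsrPolySize numDataBits LfsrMatrix out) := by unfold Spec_GetXorTaps; infer_instance

-- ===== CLAIM (what is proved, stated in full; the proofs are below) =====
def Claim_equal_GetXorTaps : Prop := ∀ (lfsrPolySize : Int) (numDataBits : Int) (LfsrMatrix : List Int), Dom_GetXorTaps lfsrPolySize numDataBits LfsrMatrix → Pre_GetXorTaps lfsrPolySize numDataBits LfsrMatrix → Spec_GetXorTaps lfsrPolySize numDataBits LfsrMatrix (GetXorTaps lfsrPolySize numDataBits LfsrMatrix)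

-- ===== LEMMAS AND PROOFS =====

-- range(0, b) as a list of casted Nats (empty when b ≤ 0)
theorem pvPyRange (b : Int) :
    PySem.List.pyRange 0 b 1 = (List.range b.toNat).map (fun k : Nat => (k : Int)) := by
  by_cases hb : 0 ≤ b
  · conv_lhs => rw [← Int.toNat_of_nonneg hb, PySem.List.pyRange_zero_natCast]

  · rw [PySem.List.pyRange_one_eq_nil (by omega), Int.toNat_of_nonpos (by omega)]
    rfl

-- entry and shape of a list-of-lists
def pvGet2 (m : List (List Int)) (i j : Nat) : Option Int := m[i]?.bind (fun r => r[j]?)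
def pvShape (m : List (List Int)) : List Nat := m.map List.length

theorem pvGet2_map_range (Ln : Nat) (g : Nat → List Int) (p q : Nat) :
    pvGet2 ((List.range Ln).map g) p q = if p < Ln then (g p)[q]? else none := by
  unfold pvGet2
  by_cases hp : p < Ln
  · simp [hp]
  · rw [List.getElem?_eq_none (by simp; omega)]
    simp [hp]

theorem pvShape_set2 (m : List (List Int)) (a b : Nat) : pvShape (pvSet2 m a b) = pvShape m := by
  unfold pvShape pvSet2
  apply List.ext_getElem?
  intro i
  simp [List.getElem?_modify]
  cases m[i]? with
  | none => rfl
  | some r => by_cases h : a = i <;> simp [h]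

theorem pvGet2_set2 (m : List (List Int)) (a b i j : Nat) :
    pvGet2 (pvSet2 m a b) i j =
      if a = i ∧ b = j ∧ (pvGet2 m i j).isSome then some 1 else pvGet2 m i j := by
  unfold pvGet2 pvSet2
  rw [List.getElem?_modify]
  cases hm : m[i]? with
  | none => simp
  | some r =>
    by_cases ha : a = i
    · by_cases hb : b = j
      · by_cases hr : j < r.length
        · simp [ha, hb, hr]
        · simp [ha, hb, hr]
      · simp [ha, hb]
    · simp [ha]

theorem pvGet2_isSome_set2 (m : List (List Int)) (a b i j : Nat) :
    (pvGet2 (pvSet2 m a b) i j).isSome = (pvGet2 m i j).isSome := by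
  rw [pvGet2_set2]
  split_ifs with h
  · simp [h.2.2]
  · rfl

theorem pvShape_foldl (S : List (Nat × Nat)) :
    ∀ m, pvShape (S.foldl (fun acc p => pvSet2 acc p.1 p.2) m) = pvShape m := by
  induction S with
  | nil => intro m; rfl
  | cons p S ih => intro m; rw [List.foldl_cons, ih, pvShape_set2]

theorem pvGet2_foldl (S : List (Nat × Nat)) :
    ∀ m i j, pvGet2 (S.foldl (fun acc p => pvSet2 acc p.1 p.2) m) i j =
      if (i, j) ∈ S ∧ (pvGet2 m i j).isSome then some 1 else pvGet2 m i j := by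
  induction S with
  | nil => intro m i j; simp
  | cons p S ih =>
    intro m i j
    obtain ⟨a, b⟩ := p
    rw [List.foldl_cons, ih, pvGet2_isSome_set2, pvGet2_set2]
    simp only [List.mem_cons, Prod.mk.injEq]
    by_cases hs : (pvGet2 m i j).isSome
    · by_cases hmem : (i, j) ∈ S
      · simp [hmem, hs]
      · by_cases hab : a = i ∧ b = j
        · simp [hmem, hab.1, hab.2, hs]
        · have h1 : ¬(a = i ∧ b = j ∧ (pvGet2 m i j).isSome = true) :=
            fun h => hab ⟨h.1, h.2.1⟩
          have h2 : ¬(i = a ∧ j = b) := fun h => hab ⟨h.1.symm, h.2.symm⟩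
          simp [hmem, h1, h2]
    · simp [hs]

theorem pvExt2 (m m' : List (List Int)) (hsh : pvShape m = pvShape m')
    (hget : ∀ i j, pvGet2 m i j = pvGet2 m' i j) : m = m' := by
  apply List.ext_getElem?
  intro i
  have hlen : m[i]?.map List.length = m'[i]?.map List.length := by
    have := congrArg (fun l => l[i]?) hsh
    simpa [pvShape] using this
  cases hm : m[i]? with
  | none =>
    cases hm' : m'[i]? with
    | none => rfl
    | some r' => rw [hm, hm'] at hlen; simp at hlen
  | some r =>
    cases hm' : m'[i]? with
    | none => rw [hm, hm'] at hlen; simp at hlen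
    | some r' =>
      rw [hm, hm'] at hlen
      simp only [Option.map_some, Option.some.injEq] at hlen
      congr 1
      apply List.ext_getElem?
      intro j
      have := hget i j
      rw [pvGet2, pvGet2, hm, hm'] at this
      by_cases hj : j < r.length
      · simpa using this
      · rw [List.getElem?_eq_none (by omega), List.getElem?_eq_none (by omega : r'.length ≤ j)]

-- a conditional-write loop is the plain write loop over the filtered write list
theorem pvFoldl_ite_filterMap (xs : List Nat) (C : Nat → Prop) [DecidablePred C]
    (f : Nat → Nat × Nat) :
    ∀ m, xs.foldl (fun acc k => if C k then pvSet2 acc (f k).1 (f k).2 else acc) m =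
      (xs.filterMap (fun k => if C k then some (f k) else none)).foldl
        (fun acc p => pvSet2 acc p.1 p.2) m := by
  induction xs with
  | nil => intro m; rfl
  | cons y xs ih =>
    intro m
    by_cases hy : C y <;> simp [hy, ih]

-- A's shape: the conditional double scatter loop over zeros builds the 0/1 grid of its condition
theorem pvScatter (Ln Nn : Nat) (C : Nat → Nat → Prop) [∀ i j, Decidable (C i j)] :
    (List.range Ln).foldl
      (fun x i => (List.range Nn).foldl
        (fun x j => if C i j then pvSet2 x i j else x) x)
      ((List.range Ln).map (fun _ => List.replicate Nn (0 : Int)))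
    = (List.range Ln).map (fun i => (List.range Nn).map (fun j => if C i j then (1 : Int) else 0)) := by
  have hA : ∀ x, (List.range Ln).foldl
      (fun x i => (List.range Nn).foldl
        (fun x j => if C i j then pvSet2 x i j else x) x) x =
      ((List.range Ln).flatMap (fun i => (List.range Nn).filterMap
        (fun j => if C i j then some (i, j) else none))).foldl
        (fun acc p => pvSet2 acc p.1 p.2) x := by
    intro x
    rw [List.foldl_flatMap]
    exact List.foldl_ext _ _ x fun a b _ => pvFoldl_ite_filterMap (List.range Nn)
      (fun j => C b j) (fun j => (b, j)) a
  rw [hA]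
  apply pvExt2
  · rw [pvShape_foldl]
    unfold pvShape
    simp [Function.comp_def]
  · intro p q
    rw [pvGet2_foldl]
    have hmem : ((p, q) ∈ (List.range Ln).flatMap (fun i => (List.range Nn).filterMap
        (fun j => if C i j then some (i, j) else none))) ↔ (p < Ln ∧ q < Nn ∧ C p q) := by
      simp only [List.mem_flatMap, List.mem_filterMap, List.mem_range,
        Option.ite_none_right_eq_some, Option.some.injEq, Prod.mk.injEq]
      constructor
      · rintro ⟨i, hi, j, hj, hc, hip, hjq⟩
        exact ⟨hip ▸ hi, hjq ▸ hj, hip ▸ hjq ▸ hc⟩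
      · rintro ⟨hp, hq, hc⟩
        exact ⟨p, hp, q, hq, hc, rfl, rfl⟩
    have hinit : pvGet2 ((List.range Ln).map (fun _ => List.replicate Nn (0 : Int))) p q
        = if p < Ln ∧ q < Nn then some 0 else none := by
      rw [pvGet2_map_range]
      by_cases hp : p < Ln
      · by_cases hq : q < Nn <;> simp [hp, hq]
      · simp [hp]
    have hrhs : pvGet2 ((List.range Ln).map
          (fun i => (List.range Nn).map (fun j => if C i j then (1 : Int) else 0))) p q
        = if p < Ln ∧ q < Nn then some (if C p q then (1 : Int) else 0) else none := by
      rw [pvGet2_map_range]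
      by_cases hp : p < Ln
      · by_cases hq : q < Nn <;> simp [hp, hq]
      · simp [hp]
    simp only [hmem, hinit, hrhs]
    by_cases hp : p < Ln
    · by_cases hq : q < Nn
      · by_cases hc : C p q <;> simp [hp, hq, hc]
      · simp [hq]
    · simp [hp]

-- B's shape: a stride-L slice of the flat matrix, read off element by element
theorem pvSliceRow (M : List Int) (L off i : Int) (m : Nat) (hL : 0 < L) (hoff : 0 ≤ off)
    (hi : 0 ≤ i) (hiL : i < L) (hlen : off + (m : Int) * L ≤ (M.length : Int)) :
    (PySem.List.slice? M (some (off + i)) (some (off + (m : Int) * L)) L).getD []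
    = (List.range m).map (fun k : Nat => PySem.List.pyGetD M (off + i + (k : Int) * L) 0) := by
  have hmL : 0 ≤ (m : Int) * L := by positivity
  simp only [PySem.List.slice?, PySem.List.sliceIndices]
  rw [if_neg (show ¬ L = 0 by omega)]
  simp only [if_neg (show ¬ L < 0 by omega), if_neg (show ¬ off + i < 0 by omega),
    if_neg (show ¬ off + (m : Int) * L < 0 by omega), if_pos hL,
    min_eq_left hlen, Option.getD_some]
  rcases Nat.eq_zero_or_pos m with hm | hm
  · subst hm
    rw [if_neg (show ¬ min (off + i) (M.length:Int) < off + (0:Nat) * L by push_cast; omega)]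
    simp
  · have hLm : L ≤ (m:Int)*L := by nlinarith
    have hmin : off + i ≤ (M.length : Int) := by omega
    rw [min_eq_left hmin, if_pos (show off + i < off + (m:Int)*L by omega)]
    have hdiv : (off + (m:Int)*L - (off + i) + L - 1) / L = (m : Int) := by
      rw [← PySem.Int.floordiv_eq_ediv_of_pos hL, PySem.Int.floordiv_eq_iff_of_pos hL]
      constructor <;> nlinarith
    rw [hdiv, Int.toNat_natCast]
    have helt : ∀ k ∈ List.range m, M[((off+i) + L*(k:Int)).toNat]?
        = some (PySem.List.pyGetD M (off + i + (k:Int)*L) 0) := by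
      intro k hk
      rw [List.mem_range] at hk
      have hk1 : (k:Int) ≤ (m:Int) - 1 := by exact_mod_cast Int.le_sub_one_of_lt (by exact_mod_cast hk : (k:Int) < (m:Int))
      have hkL : (k:Int)*L ≤ ((m:Int) - 1)*L := by nlinarith
      have hlt : off + i + (k:Int)*L < (M.length : Int) := by nlinarith
      have h0 : 0 ≤ off + i + (k:Int)*L := by positivity
      rw [mul_comm L (k:Int), PySem.List.pyGetD_eq_getElem M 0 h0 hlt,
        List.getElem?_eq_getElem (show (off + i + (k:Int)*L).toNat < M.length by omega)]
    rw [List.filterMap_congr helt]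
    simp [List.filterMap_eq_map']

-- ===== VERDICT (by name: the statement is the Claim_ definition above) =====
theorem GetXorTaps_spec : Claim_equal_GetXorTaps := by
  intro L N M _ hpre
  unfold Spec_GetXorTaps GetXorTaps GetXorTaps_alt
  by_cases hL : 0 < L
  case neg =>
    have hz : L.toNat = 0 := Int.toNat_of_nonpos (by omega)
    simp only [pvPyRange, hz]
    simp
  case pos =>
    have hlen : L * L + ((N.toNat : Int)) * L ≤ (M.length : Int) := by
      rcases hpre with h | h
      · exact absurd h (not_le.mpr hL)
      · simpa [Int.ofNat_toNat] using h
    have hLL : ((L.toNat : Int)) * L = L * L := by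
      rw [Int.toNat_of_nonneg (le_of_lt hL)]
    -- A side: split the pair fold, move to List.range indices, and apply pvScatter
    rw [PySem.List.foldl_prod_mk
      (fun d (i : Int) => (PySem.List.pyRange 0 N 1).foldl
        (fun d j => if PySem.List.pyGetD M (L * L + j * L + i) 0 ≠ 0 then
          pvSet2 d i.toNat j.toNat else d) d)
      (fun c (i : Int) => (PySem.List.pyRange 0 L 1).foldl
        (fun c j => if PySem.List.pyGetD M (j * L + i) 0 ≠ 0 then
          pvSet2 c i.toNat j.toNat else c) c)
      (PySem.List.pyRange 0 L 1) _ _]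
    simp only [pvPyRange, List.foldl_map, List.map_map, Int.toNat_natCast, Function.comp_def]
    rw [pvScatter L.toNat N.toNat (fun i j => PySem.List.pyGetD M (L * L + (j:Int) * L + (i:Int)) 0 ≠ 0),
        pvScatter L.toNat L.toNat (fun i j => PySem.List.pyGetD M ((j:Int) * L + (i:Int)) 0 ≠ 0)]
    -- B side: each row is the slice read off element by element
    refine Prod.ext ?_ ?_
    · refine List.map_congr_left ?_
      intro i hi
      rw [List.mem_range] at hi
      have h1 : L * L + max N 0 * L = L * L + ((N.toNat : Int)) * L := by
        rw [Int.ofNat_toNat]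
      rw [h1, pvSliceRow M L (L * L) (i : Int) N.toNat hL (by positivity) (by positivity)
        (by omega) hlen, List.map_map]
      refine List.map_congr_left ?_
      intro j hj
      have : L * L + (j:Int) * L + (i:Int) = L * L + (i:Int) + (j:Int) * L := by ring
      simp [this]
    · refine List.map_congr_left ?_
      intro i hi
      rw [List.mem_range] at hi
      have h2 := pvSliceRow M L 0 (i : Int) L.toNat hL le_rfl (by positivity)
        (by omega) (by rw [zero_add, hLL]; nlinarith [hlen, mul_nonneg (Int.natCast_nonneg N.toNat) (le_of_lt hL)])
      rw [zero_add] at h2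
      rw [show L * L = 0 + ((L.toNat : Int)) * L by rw [zero_add, hLL], h2, List.map_map]
      refine List.map_congr_left ?_
      intro j hj
      have : (j:Int) * L + (i:Int) = 0 + (i:Int) + (j:Int) * L := by ring
      simp [this]
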